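-- pv_equiv track=rewrite | github.com/Romulad/asyncio-vs-thread | lib.py | generate_valid_urls
-- ===== SOURCE A (Python) =====
-- def generate_valid_urls(count=10000):
--     param = "abcdefghijklmnopqrstuvwxyz"
--     for i in range(count):
--         url = f"http://to-httpbin-services-29cc40ffe47a42c4.elb.eu-west-3.amazonaws.com/anything/{i}?query={param}"
--
--         if len(param.encode()) // 1000 >= 1:
--             param = "abcdefghijklmnopqrstuvwxyz"
--         else:
--             param += param
--
--         yield url
-- ===== SOURCE B (Python) =====
-- def generate_valid_urls(count=10000):
--     base = "abcdefghijklmnopqrstuvwxyz"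
--     params = [base * (1 << j) for j in range(7)]
--     for i in range(count):
--         yield f"http://to-httpbin-services-29cc40ffe47a42c4.elb.eu-west-3.amazonaws.com/anything/{i}?query={params[i % 7]}"
-- ===== Notes on version B (the rewrite author's own statement) =====
-- stated objective: simpler
-- what changed: The stateful double-or-reset param machine is replaced by a precomputed 7-entry cycle of param strings indexed by i % 7 inside a plain comprehension-style loop.
import Mathlib
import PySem

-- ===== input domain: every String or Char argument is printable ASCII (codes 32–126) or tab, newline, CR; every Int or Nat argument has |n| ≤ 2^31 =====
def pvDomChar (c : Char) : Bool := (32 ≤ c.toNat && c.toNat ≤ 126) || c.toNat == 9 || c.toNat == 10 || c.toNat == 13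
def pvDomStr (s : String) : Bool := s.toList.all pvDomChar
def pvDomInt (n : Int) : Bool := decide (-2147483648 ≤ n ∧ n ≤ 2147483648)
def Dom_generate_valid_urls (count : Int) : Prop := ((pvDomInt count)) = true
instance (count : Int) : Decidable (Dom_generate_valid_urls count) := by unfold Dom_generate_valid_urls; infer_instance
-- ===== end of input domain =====

-- B replaces A's stateful double-or-reset param machine by a precomputed 7-entry cycle indexed by i % 7 (objective: simpler).
-- A is a generator; both ports return the list of yielded URLs.

-- ===== PORT A =====
def pvBase : List Char := "abcdefghijklmnopqrstuvwxyz".toList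
def pvUrlPre : List Char := "http://to-httpbin-services-29cc40ffe47a42c4.elb.eu-west-3.amazonaws.com/anything/".toList
def pvUrlQ : List Char := "?query=".toList

-- f-string built on the List Char side (String.ofList); param is pure ASCII so len(param.encode()) = number of chars (exact here)
def generate_valid_urls (count : Int) : List String :=
  ((PySem.List.pyRange 0 count 1).foldl
    (fun (st : List String × List Char) i =>
      (st.1 ++ [String.ofList (pvUrlPre ++ PySem.Int.toChars i ++ pvUrlQ ++ st.2)],
       if 1 ≤ PySem.Int.floordiv ((st.2.length : Int)) 1000 then pvBase else st.2 ++ st.2))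
    ([], pvBase)).1

-- ===== PORT B =====
def pvParamsTable : List (List Char) :=
  (PySem.List.pyRange 0 7 1).map (fun j => PySem.List.pyRepeat pvBase ((1 : Int) <<< j.toNat))

def generate_valid_urls_alt (count : Int) : List String :=
  (PySem.List.pyRange 0 count 1).map (fun i =>
    String.ofList (pvUrlPre ++ PySem.Int.toChars i ++ pvUrlQ ++
      PySem.List.pyGetD pvParamsTable (PySem.Int.mod i 7) []))

-- ===== PRECONDITION & SPEC =====
def Spec_generate_valid_urls (count : Int) (out : List String) : Prop := out = generate_valid_urls_alt count
instance (count : Int) (out : List String) : Decidable (Spec_generate_valid_urls count out) := by unfold Spec_generate_valid_urls; infer_instance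

-- ===== CLAIM (what is proved, stated in full; the proofs are below) =====
def Claim_equal_generate_valid_urls : Prop := ∀ (count : Int), Dom_generate_valid_urls count → Spec_generate_valid_urls count (generate_valid_urls count)

-- ===== LEMMAS AND PROOFS =====

-- the 7-periodic param cycle, doubling form
def pvTbl : Nat → List Char
  | 0 => pvBase
  | n + 1 => pvTbl n ++ pvTbl n

def pvP (i : Int) : List Char := pvTbl (PySem.Int.mod i 7).toNat

lemma pvMod7_lt (i : Int) : (PySem.Int.mod i 7).toNat < 7 := by
  have h := PySem.Int.mod_lt i (b := 7) (by norm_num)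
  have h0 := PySem.Int.mod_nonneg i (b := 7) (by norm_num)
  omega

lemma pvMod7_succ (i : Int) :
    (PySem.Int.mod (i + 1) 7).toNat =
      (if (PySem.Int.mod i 7).toNat = 6 then 0 else (PySem.Int.mod i 7).toNat + 1) := by
  have e1 : PySem.Int.mod i 7 = i % 7 := PySem.Int.mod_eq_emod_of_pos (by norm_num)
  have e2 : PySem.Int.mod (i + 1) 7 = (i + 1) % 7 := PySem.Int.mod_eq_emod_of_pos (by norm_num)
  rw [e1, e2]
  by_cases h6 : (i % 7).toNat = 6 <;> simp only [h6, if_true, if_false] <;> omega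

lemma pvTbl_length (n : Nat) : (pvTbl n).length = 26 * 2 ^ n := by
  induction n with
  | zero => decide
  | succ n ih => simp [pvTbl, List.length_append, ih, pow_succ]; ring

lemma pvCondIff (j : Nat) :
    (1 ≤ PySem.Int.floordiv (((pvTbl j).length : Int)) 1000) ↔ 1000 ≤ 26 * 2 ^ j := by
  rw [PySem.Int.le_floordiv_iff_mul_le (by norm_num), pvTbl_length]
  push_cast
  constructor <;> intro hx <;> exact_mod_cast hx

lemma pvCond0 : ¬ (1 ≤ PySem.Int.floordiv (((pvTbl 0).length : Int)) 1000) := by rw [pvCondIff]; norm_num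
lemma pvCond1 : ¬ (1 ≤ PySem.Int.floordiv (((pvTbl 1).length : Int)) 1000) := by rw [pvCondIff]; norm_num
lemma pvCond2 : ¬ (1 ≤ PySem.Int.floordiv (((pvTbl 2).length : Int)) 1000) := by rw [pvCondIff]; norm_num
lemma pvCond3 : ¬ (1 ≤ PySem.Int.floordiv (((pvTbl 3).length : Int)) 1000) := by rw [pvCondIff]; norm_num
lemma pvCond4 : ¬ (1 ≤ PySem.Int.floordiv (((pvTbl 4).length : Int)) 1000) := by rw [pvCondIff]; norm_num
lemma pvCond5 : ¬ (1 ≤ PySem.Int.floordiv (((pvTbl 5).length : Int)) 1000) := by rw [pvCondIff]; norm_num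
lemma pvCond6 : 1 ≤ PySem.Int.floordiv (((pvTbl 6).length : Int)) 1000 := by rw [pvCondIff]; norm_num

-- one loop step of A maps the cycle to its successor
lemma pvStep_eq (i : Int) :
    (if 1 ≤ PySem.Int.floordiv (((pvP i).length : Int)) 1000 then pvBase else pvP i ++ pvP i)
      = pvP (i + 1) := by
  unfold pvP
  rw [pvMod7_succ i]
  have h7 := pvMod7_lt i
  interval_cases h : (PySem.Int.mod i 7).toNat <;>
    [ (rw [if_neg pvCond0]; rfl); (rw [if_neg pvCond1]; rfl); (rw [if_neg pvCond2]; rfl);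
      (rw [if_neg pvCond3]; rfl); (rw [if_neg pvCond4]; rfl); (rw [if_neg pvCond5]; rfl);
      (rw [if_pos pvCond6]; rfl) ]

-- the A fold over any aligned range, with the cycle as invariant
lemma pvFold (n : Nat) : ∀ (a : Int) (acc : List String), 0 ≤ a →
    (PySem.List.pyRange a (a + n) 1).foldl
      (fun (st : List String × List Char) i =>
        (st.1 ++ [String.ofList (pvUrlPre ++ PySem.Int.toChars i ++ pvUrlQ ++ st.2)],
         if 1 ≤ PySem.Int.floordiv ((st.2.length : Int)) 1000 then pvBase else st.2 ++ st.2))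
      (acc, pvP a)
    = (acc ++ (PySem.List.pyRange a (a + n) 1).map
        (fun i => String.ofList (pvUrlPre ++ PySem.Int.toChars i ++ pvUrlQ ++ pvP i)),
       pvP (a + n)) := by
  induction n with
  | zero =>
      intro a acc _
      simp [PySem.List.pyRange_one_eq_nil (le_refl a)]
  | succ n ih =>
      intro a acc ha
      have hlt : a < a + ((n : Int) + 1) := by omega
      have hcons := PySem.List.pyRange_one_cons (a := a) (b := a + ((n : Int) + 1)) hlt
      have hcast : (((n + 1 : Nat)) : Int) = (n : Int) + 1 := by push_cast; ring
      rw [hcast, hcons]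
      simp only [List.foldl_cons, List.map_cons]
      rw [pvStep_eq a]
      have harg : a + ((n : Int) + 1) = (a + 1) + (n : Int) := by ring
      rw [harg]
      rw [ih (a + 1) (acc ++ [String.ofList (pvUrlPre ++ PySem.Int.toChars a ++ pvUrlQ ++ pvP a)]) (by omega)]
      simp

-- B's table lookup agrees with the cycle
set_option maxRecDepth 100000 in
lemma pvLookup (i : Int) :
    PySem.List.pyGetD pvParamsTable (PySem.Int.mod i 7) [] = pvP i := by
  unfold pvP
  have h0 := PySem.Int.mod_nonneg i (b := 7) (by norm_num)
  have h7 := pvMod7_lt i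
  have e : PySem.Int.mod i 7 = (((PySem.Int.mod i 7).toNat : Nat) : Int) := by omega
  rw [e]
  interval_cases h : (PySem.Int.mod i 7).toNat <;> decide

theorem pvMain (count : Int) : generate_valid_urls count = generate_valid_urls_alt count := by
  unfold generate_valid_urls generate_valid_urls_alt
  by_cases h : count ≤ 0
  · rw [PySem.List.pyRange_one_eq_nil (by omega)]
    simp
  · have hc : count = 0 + (count.toNat : Int) := by omega
    have hfold := pvFold count.toNat 0 [] (le_refl 0)
    rw [show pvP 0 = pvBase from by decide] at hfold
    rw [hc, hfold]
    simp only [List.nil_append]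
    apply List.map_congr_left
    intro i _
    rw [pvLookup i]

-- ===== VERDICT (by name: the statement is the Claim_ definition above) =====
theorem generate_valid_urls_spec : Claim_equal_generate_valid_urls := by
  intro count _
  unfold Spec_generate_valid_urls
  exact pvMain count
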